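-- pv_equiv track=rewrite | github.com/Sahtattou/Aegis | api/app/services/blueteam/ioc_extractor.py | _is_typosquat
-- ===== SOURCE A (Python) =====
-- KNOWN_BRANDS = [
--     "poste.tn",
--     "tunisietelecom.tn",
--     "biat.com.tn",
--     "ooredoo.tn",
--     "stb.com.tn",
-- ]
--
-- def _levenshtein_distance(a: str, b: str) -> int:
--     if a == b:
--         return 0
--     if not a:
--         return len(b)
--     if not b:
--         return len(a)
--     prev = list(range(len(b) + 1))
--     for i, ca in enumerate(a, start=1):
--         curr = [i]
--         for j, cb in enumerate(b, start=1):
--             ins = curr[j - 1] + 1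
--             delete = prev[j] + 1
--             sub = prev[j - 1] + (0 if ca == cb else 1)
--             curr.append(min(ins, delete, sub))
--         prev = curr
--     return prev[-1]
--
-- def _is_typosquat(domain: str) -> bool:
--     candidate = domain.lower()
--     for legit in KNOWN_BRANDS:
--         if candidate == legit:
--             return False
--         if _levenshtein_distance(candidate, legit) <= 2:
--             return True
--     return False
-- ===== SOURCE B (Python) =====
-- KNOWN_BRANDS = [
--     "poste.tn",
--     "tunisietelecom.tn",
--     "biat.com.tn",
--     "ooredoo.tn",
--     "stb.com.tn",
-- ]
--
-- def _edit_distance_memo(a: str, b: str) -> int: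
--     # top-down memoized recursion over prefix lengths (same recurrence, opposite direction)
--     memo = {}
--     def d(i, j):
--         if i == 0:
--             return j
--         if j == 0:
--             return i
--         key = (i, j)
--         if key in memo:
--             return memo[key]
--         cost = 0 if a[i - 1] == b[j - 1] else 1
--         r = min(d(i, j - 1) + 1, d(i - 1, j) + 1, d(i - 1, j - 1) + cost)
--         memo[key] = r
--         return r
--     return d(len(a), len(b))
--
-- def _is_typosquat(domain: str) -> bool:
--     candidate = domain.lower()
--     for legit in KNOWN_BRANDS:
--         if candidate == legit:
--             return False
--         # edit distance is at least the length difference, so skip hopeless brands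
--         if abs(len(candidate) - len(legit)) <= 2 and _edit_distance_memo(candidate, legit) <= 2:
--             return True
--     return False
-- ===== Notes on version B (the rewrite author's own statement) =====
-- stated objective: faster
-- what changed: The bottom-up rolling-array Levenshtein DP is replaced by a top-down memoized recursion over prefix lengths, and a length-difference prefilter skips brands whose length differs from the candidate by more than 2 (edit distance is at least the length gap), so long domains never run the DP at all.
import Mathlib
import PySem

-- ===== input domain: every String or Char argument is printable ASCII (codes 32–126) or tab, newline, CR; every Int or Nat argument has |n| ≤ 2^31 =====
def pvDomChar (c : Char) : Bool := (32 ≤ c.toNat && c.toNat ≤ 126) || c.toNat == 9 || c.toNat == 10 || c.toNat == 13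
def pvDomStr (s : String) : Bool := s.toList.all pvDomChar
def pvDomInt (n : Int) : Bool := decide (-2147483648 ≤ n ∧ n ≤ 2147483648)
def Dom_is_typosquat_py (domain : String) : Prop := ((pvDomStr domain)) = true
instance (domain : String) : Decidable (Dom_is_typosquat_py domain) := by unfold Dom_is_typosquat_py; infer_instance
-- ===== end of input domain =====

-- B replaces the bottom-up rolling-array Levenshtein DP by a memoized top-down recursion plus a
-- length-difference prefilter (skip brands whose length differs by more than 2): faster on long domains.


def KNOWN_BRANDS : List String :=
  ["poste.tn", "tunisietelecom.tn", "biat.com.tn", "ooredoo.tn", "stb.com.tn"]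

-- ===== PORT A =====
-- inner loop `for j, cb in enumerate(b, start=1)`: the accesses curr[j-1] (= d, the last value
-- appended), prev[j] and prev[j-1] are realized by walking prev in step with bs (prev window
-- p0 :: p1 :: … starts at index j-1); builds the tail of curr front-to-back.
def levA_inner (ca : Char) : List Char → List Nat → Nat → List Nat
  | [], _, _ => []
  | _ :: _, [], _ => []
  | _ :: _, [_], _ => []
  | cb :: bs', p0 :: p1 :: rest, d =>
    let v := min (min (d + 1) (p1 + 1)) (p0 + (if ca == cb then 0 else 1))
    v :: levA_inner ca bs' (p1 :: rest) v

-- outer loop `for i, ca in enumerate(a, start=1)`: state is (remaining chars of a, number of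
-- chars already processed, prev row); curr = [i] ++ inner row.
def levA_outer (bs : List Char) : List Char → Nat → List Nat → List Nat
  | [], _, prev => prev
  | ca :: as', i, prev => levA_outer bs as' (i + 1) ((i + 1) :: levA_inner ca bs prev (i + 1))

def levA (a b : String) : Nat :=
  let la := a.toList
  let lb := b.toList
  if la == lb then 0
  else if la.isEmpty then lb.length
  else if lb.isEmpty then la.length
  else
    -- prev[-1]: prev is nonempty (length = len b + 1), so Python's [-1] is the last element
    (levA_outer lb la 0 (List.range (lb.length + 1))).getLastD 0

def loopA (candidate : String) : List String → Bool
  | [] => false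
  | legit :: rest =>
    if candidate == legit then false
    else if levA candidate legit ≤ 2 then true
    else loopA candidate rest

def is_typosquat_py (domain : String) : Bool :=
  loopA (PySem.Str.lower domain) KNOWN_BRANDS

-- ===== PORT B =====
-- memoized recursion d(i, j); the memo dict is modelled as an association list with unique keys
-- (each key is written at most once, so first-match lookup = Python dict lookup; insertion
-- position is irrelevant for lookups on unique keys).
def levB_d (a b : List Char) : Nat → Nat → List ((Nat × Nat) × Nat) → Nat × List ((Nat × Nat) × Nat)
  | 0, j, memo => (j, memo)
  | i + 1, 0, memo => (i + 1, memo)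
  | i + 1, j + 1, memo =>
    match List.lookup (i + 1, j + 1) memo with
    | some v => (v, memo)
    | none =>
      let cost := if a.getD i ' ' == b.getD j ' ' then 0 else 1
      let r1 := levB_d a b (i + 1) j memo          -- d(i, j-1), threading the memo
      let r2 := levB_d a b i (j + 1) r1.2          -- d(i-1, j)
      let r3 := levB_d a b i j r2.2                -- d(i-1, j-1)
      let r := min (min (r1.1 + 1) (r2.1 + 1)) (r3.1 + cost)
      (r, ((i + 1, j + 1), r) :: r3.2)
termination_by i j _ => i + j

def levB (a b : String) : Nat :=
  (levB_d a.toList b.toList a.toList.length b.toList.length []).1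

def loopB (candidate : String) : List String → Bool
  | [] => false
  | legit :: rest =>
    if candidate == legit then false
    else if ((candidate.toList.length : Int) - legit.toList.length).natAbs ≤ 2
            && levB candidate legit ≤ 2 then true
    else loopB candidate rest

def is_typosquat_py_alt (domain : String) : Bool :=
  loopB (PySem.Str.lower domain) KNOWN_BRANDS

-- ===== PRECONDITION & SPEC =====
def Spec_is_typosquat_py (domain : String) (out : Bool) : Prop := out = is_typosquat_py_alt domain
instance (domain : String) (out : Bool) : Decidable (Spec_is_typosquat_py domain out) := by unfold Spec_is_typosquat_py; infer_instance

-- ===== CLAIM (what is proved, stated in full; the proofs are below) =====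
def Claim_equal_is_typosquat_py : Prop := ∀ (domain : String), Dom_is_typosquat_py domain → Spec_is_typosquat_py domain (is_typosquat_py domain)

-- ===== LEMMAS AND PROOFS =====

-- reference recurrence: edit distance of the i- and j-prefixes, same cell formula as both ports
def Dref (a b : List Char) : Nat → Nat → Nat
  | 0, j => j
  | i + 1, 0 => i + 1
  | i + 1, j + 1 =>
    min (min (Dref a b (i + 1) j + 1) (Dref a b i (j + 1) + 1))
        (Dref a b i j + (if a.getD i ' ' == b.getD j ' ' then 0 else 1))
termination_by i j => i + j

lemma Dref_zero_left (a b : List Char) (j : Nat) : Dref a b 0 j = j := by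
  cases j <;> simp [Dref]

lemma Dref_zero_right (a b : List Char) (i : Nat) : Dref a b i 0 = i := by
  cases i <;> simp [Dref]

lemma Dref_self (a : List Char) (i : Nat) : Dref a a i i = 0 := by
  induction i with
  | zero => simp [Dref]
  | succ k ih => simp [Dref, ih]

lemma Dref_ge_sub (a b : List Char) (i j : Nat) : i - j ≤ Dref a b i j ∧ j - i ≤ Dref a b i j := by
  induction hn : i + j using Nat.strong_induction_on generalizing i j with
  | _ n ih =>
    match i, j with
    | 0, j => simp [Dref]
    | i + 1, 0 => simp [Dref]
    | i + 1, j + 1 =>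
      have h1 := ih ((i + 1) + j) (by omega) (i + 1) j rfl
      have h2 := ih (i + (j + 1)) (by omega) i (j + 1) rfl
      have h3 := ih (i + j) (by omega) i j rfl
      simp only [Dref]
      omega

lemma lookup_sound {α : Type} [BEq α] [LawfulBEq α] {f : α → Nat} :
    ∀ (memo : List (α × Nat)), (∀ p ∈ memo, p.2 = f p.1) →
      ∀ k v, List.lookup k memo = some v → v = f k := by
  intro memo hm k v hl
  induction memo with
  | nil => simp [List.lookup] at hl
  | cons p rest ih =>
    obtain ⟨k', v'⟩ := p
    rw [List.lookup_cons] at hl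
    by_cases h : k == k'
    · simp [h] at hl
      have hk : k = k' := by simpa using h
      rw [← hl, hk]
      exact hm (k', v') (by simp)
    · simp [h] at hl
      exact ih (fun q hq => hm q (by simp [hq])) hl

lemma levB_d_spec (a b : List Char) (i j : Nat) (memo : List ((Nat × Nat) × Nat))
    (hm : ∀ p ∈ memo, p.2 = Dref a b p.1.1 p.1.2) :
    (levB_d a b i j memo).1 = Dref a b i j ∧
    (∀ p ∈ (levB_d a b i j memo).2, p.2 = Dref a b p.1.1 p.1.2) := by
  induction hn : i + j using Nat.strong_induction_on generalizing i j memo with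
  | _ n ih =>
    match i, j with
    | 0, j => simpa [levB_d, Dref_zero_left] using hm
    | i + 1, 0 => simpa [levB_d, Dref_zero_right] using hm
    | i + 1, j + 1 =>
      rw [levB_d]
      cases hl : List.lookup (i + 1, j + 1) memo with
      | some v =>
        have hv : v = Dref a b (i + 1) (j + 1) :=
          lookup_sound (f := fun k => Dref a b k.1 k.2) memo hm (i + 1, j + 1) v hl
        exact ⟨hv, hm⟩
      | none =>
        obtain ⟨e1, hm1⟩ := ih ((i + 1) + j) (by omega) (i + 1) j memo hm rfl
        obtain ⟨e2, hm2⟩ := ih (i + (j + 1)) (by omega) i (j + 1) _ hm1 rfl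
        obtain ⟨e3, hm3⟩ := ih (i + j) (by omega) i j _ hm2 rfl
        refine ⟨by simp only; rw [e1, e2, e3, Dref], ?_⟩
        intro p hp
        simp only [List.mem_cons] at hp
        rcases hp with hp | hp
        · subst hp; simp only; rw [e1, e2, e3, Dref]
        · exact hm3 p hp

lemma levB_eq_Dref (a b : String) :
    levB a b = Dref a.toList b.toList a.toList.length b.toList.length :=
  (levB_d_spec a.toList b.toList _ _ [] (by simp)).1

-- A's inner loop computes the next DP row (indices j0+1 … b.length of row i+1)
lemma levA_inner_spec (a b : List Char) (i : Nat) (ca : Char) (hca : a[i]? = some ca) :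
    ∀ (bs : List Char) (j0 : Nat) (prev : List Nat),
      bs = b.drop j0 → prev.length = bs.length + 1 →
      (∀ t, t < prev.length → prev.getD t 0 = Dref a b i (j0 + t)) →
      levA_inner ca bs prev (Dref a b (i + 1) j0) =
        (List.range bs.length).map (fun t => Dref a b (i + 1) (j0 + 1 + t)) := by
  intro bs
  induction bs with
  | nil => intro j0 prev _ _ _; cases prev with
    | nil => simp [levA_inner]
    | cons p r => simp [levA_inner]
  | cons cb bs' ihb =>
    intro j0 prev hdrop hlen hpt
    match prev, hlen with
    | p0 :: p1 :: rest, hlen =>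
      have hp0 : p0 = Dref a b i j0 := by simpa using hpt 0 (by simp)
      have hp1 : p1 = Dref a b i (j0 + 1) := by simpa using hpt 1 (by simp)
      have hcb : b.getD j0 ' ' = cb := by
        have : b[j0]? = some cb := by
          rw [← Nat.add_zero j0, ← List.getElem?_drop, ← hdrop]
          rfl
        simp [List.getD, this]
      have hstep :
          min (min (Dref a b (i + 1) j0 + 1) (p1 + 1)) (p0 + (if ca == cb then 0 else 1)) =
            Dref a b (i + 1) (j0 + 1) := by
        have hcaa : a.getD i ' ' = ca := by simp [List.getD, hca]
        rw [hp0, hp1, Dref, hcaa, hcb]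
      have hdrop' : bs' = b.drop (j0 + 1) := by
        rw [← List.tail_drop, ← hdrop]; rfl
      have ih := ihb (j0 + 1) (p1 :: rest) hdrop' (by simpa using hlen)
        (by
          intro t ht
          have h := hpt (t + 1) (by simp at ht ⊢; omega)
          rw [show j0 + (t + 1) = j0 + 1 + t by omega] at h
          simpa using h)
      rw [levA_inner]
      simp only [hstep]
      rw [ih]
      simp only [List.length_cons, List.range_succ_eq_map, List.map_cons, List.map_map]
      refine List.cons_eq_cons.mpr ⟨by norm_num, ?_⟩
      apply List.map_congr_left
      intro t _
      simp only [Function.comp_apply]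
      congr 1
      omega

-- A's outer loop turns row i into the final row a.length
lemma levA_outer_spec (a b : List Char) :
    ∀ (as' : List Char) (i : Nat) (prev : List Nat),
      as' = a.drop i → i + as'.length = a.length →
      prev.length = b.length + 1 →
      (∀ t, t < prev.length → prev.getD t 0 = Dref a b i t) →
      (levA_outer b as' i prev).length = b.length + 1 ∧
      (∀ t, t < b.length + 1 → (levA_outer b as' i prev).getD t 0 = Dref a b a.length t) := by
  intro as'
  induction as' with
  | nil =>
    intro i prev _ hi hlen hpt
    simp only [List.length_nil, Nat.add_zero] at hi
    subst hi
    exact ⟨by simpa [levA_outer] using hlen, by simpa [levA_outer, hlen] using hpt⟩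
  | cons ca as'' ih =>
    intro i prev hdrop hi hlen hpt
    have hca : a[i]? = some ca := by
      rw [← Nat.add_zero i, ← List.getElem?_drop, ← hdrop]
      rfl
    have hinner := levA_inner_spec a b i ca hca b 0 prev (by simp) (by omega)
      (by intro t ht; simpa using hpt t ht)
    have hD0 : Dref a b (i + 1) 0 = i + 1 := Dref_zero_right a b (i + 1)
    rw [hD0] at hinner
    rw [levA_outer]
    have hdrop' : as'' = a.drop (i + 1) := by rw [← List.tail_drop, ← hdrop]; rfl
    apply ih (i + 1) _ hdrop' (by simp at hi ⊢; omega)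
    · simp [hinner]
    · intro t ht
      rw [hinner] at ht ⊢
      match t with
      | 0 => simp [Dref_zero_right]
      | t + 1 =>
        have htb : t < b.length := by simp at ht; omega
        simp [List.getD, List.getElem?_range htb]
        rw [Nat.add_comm 1 t]

lemma getD_getLastD (l : List Nat) (h : l ≠ []) :
    l.getLastD 0 = l.getD (l.length - 1) 0 := by
  induction l with
  | nil => simp at h
  | cons x xs ih =>
    cases xs with
    | nil => simp
    | cons y ys => simpa using ih (by simp)

lemma levA_eq_Dref (a b : String) :
    levA a b = Dref a.toList b.toList a.toList.length b.toList.length := by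
  rw [levA]
  split
  · next h =>
    have : a.toList = b.toList := by simpa using h
    rw [this, Dref_self]
  · split
    · next h _ =>
      simp only [List.isEmpty_iff] at *
      next he => rw [he]; simp [Dref_zero_left]
    · split
      · next he =>
        simp only [List.isEmpty_iff] at he
        rw [he]; simp [Dref_zero_right]
      · next h1 h2 h3 =>
        simp only [List.isEmpty_iff] at h2 h3
        obtain ⟨hlen, hpt⟩ := levA_outer_spec a.toList b.toList a.toList 0
          (List.range (b.toList.length + 1)) (by simp) (by simp) (by simp)
          (by
            intro t ht
            have ht' : t < b.length + 1 := by simpa using ht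
            simp [List.getD, List.getElem?_range ht', Dref_zero_left])
        rw [getD_getLastD _ (by intro hc; rw [hc] at hlen; simp at hlen), hlen]
        simpa using hpt b.toList.length (by omega)

lemma lev_eq (a b : String) : levA a b = levB a b := by
  rw [levA_eq_Dref, levB_eq_Dref]

lemma loop_eq (c : String) (brands : List String) : loopA c brands = loopB c brands := by
  induction brands with
  | nil => rfl
  | cons legit rest ih =>
    rw [loopA, loopB, ih]
    by_cases heq : c == legit
    · simp [heq]
    · simp only [heq, Bool.false_eq_true, if_false]
      by_cases hgap : ((c.length : Int) - legit.length).natAbs ≤ 2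
      · simp [lev_eq, hgap]
      · have hge := Dref_ge_sub c.toList legit.toList c.toList.length legit.toList.length
        have e1 : c.toList.length = c.length := by simp
        have e2 : legit.toList.length = legit.length := by simp
        have hA : ¬ levA c legit ≤ 2 := by rw [levA_eq_Dref]; omega
        have hB : ¬ levB c legit ≤ 2 := by rw [levB_eq_Dref]; omega
        simp [hA, hB, hgap]

-- ===== VERDICT (by name: the statement is the Claim_ definition above) =====
theorem is_typosquat_py_spec : Claim_equal_is_typosquat_py := by
  intro domain _
  unfold Spec_is_typosquat_py is_typosquat_py is_typosquat_py_alt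
  exact loop_eq _ _
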